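-- pv_equiv track=rewrite | github.com/Ba1oretto/Algorithm-Tutorial | programming_assignment_1/assignment_syllabus/pythonreview.py | findWithSum
-- ===== SOURCE A (Python) =====
-- import itertools
--
-- def findWithSum(arr, value, n=2):
--     # if n is 0 or list is empty, should return empty dict.
--     if n == 0 or len(arr) == 0:
--         return {}
--
--     new_arr = []
--
--     # reformat value structure
--     for index, v in enumerate(arr):
--         new_arr.append((index, v))
--
--     res = {}
--
--     # looping subsequences from new_arr
--     for subsequences in itertools.combinations(new_arr, n):
--         val = 0
--
--         # calculate value
--         for tup in subsequences:
--             val += tup[1]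
--
--         if val == value:
--             # fill dictionary
--             for tup in subsequences:
--                 res.__setitem__(tup[0], tup[1])
--
--     return res
-- ===== SOURCE B (Python) =====
-- def findWithSum(arr, value, n=2):
--     # if n is 0 or list is empty, should return empty dict.
--     if n == 0 or len(arr) == 0:
--         return {}
--
--     def good(i, need, target):
--         # index n-subsets of arr[i:] summing to target, in lexicographic order
--         if need == 0:
--             return [[]] if target == 0 else []
--         if len(arr) - i < need:
--             return []
--         with_i = [[i] + rest for rest in good(i + 1, need - 1, target - arr[i])]
--         return with_i + good(i + 1, need, target)
--
--     res = {}
--     for combo in good(0, n, value):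
--         for i in combo:
--             res[i] = arr[i]
--     return res
-- ===== Notes on version B (the rewrite author's own statement) =====
-- stated objective: alternative
-- what changed: Replaces itertools.combinations over the enumerated list (materialising every n-tuple and re-summing it) by a recursive backtracking search over indices that carries the remaining target sum and prunes branches with too few elements left.
import Mathlib
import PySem

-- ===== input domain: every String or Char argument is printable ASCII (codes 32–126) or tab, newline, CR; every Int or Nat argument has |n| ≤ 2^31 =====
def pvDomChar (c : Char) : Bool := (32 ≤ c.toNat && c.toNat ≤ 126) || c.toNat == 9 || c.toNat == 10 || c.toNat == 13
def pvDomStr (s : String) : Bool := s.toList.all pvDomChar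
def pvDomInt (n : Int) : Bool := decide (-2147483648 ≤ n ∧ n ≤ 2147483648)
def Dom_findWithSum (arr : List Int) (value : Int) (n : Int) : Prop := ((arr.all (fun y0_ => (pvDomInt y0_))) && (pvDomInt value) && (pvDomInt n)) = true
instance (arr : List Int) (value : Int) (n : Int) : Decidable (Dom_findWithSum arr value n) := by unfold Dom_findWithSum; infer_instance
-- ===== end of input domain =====

-- B replaces A's itertools.combinations enumeration (re-summing each n-tuple) by a pruned
-- backtracking search that carries the remaining target sum; objective: alternative.

-- ===== PORT A =====
-- itertools.combinations(l, k) in input (lexicographic) order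
def combsA {α : Type} : Nat → List α → List (List α)
  | 0, _ => [[]]
  | _ + 1, [] => []
  | k + 1, x :: xs => ((combsA k xs).map (x :: ·)) ++ combsA (k + 1) xs

def findWithSum (arr : List Int) (value : Int) (n : Int) : List (Int × Int) :=
  if n = 0 ∨ arr.length = 0 then [] else
  -- new_arr = [(index, v) for index, v in enumerate(arr)]
  let new_arr := (PySem.List.enumerate arr 0).foldl (fun acc t => acc ++ [(t.1, t.2)]) []
  let res : PySem.Dict Int Int :=
    (combsA n.toNat new_arr).foldl (fun res sub =>
      let val := sub.foldl (fun v t => v + t.2) 0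
      if val = value then sub.foldl (fun r t => r.insert t.1 t.2) res else res)
      PySem.Dict.empty
  res.items

-- ===== PORT B =====
-- good(i, need, target): index need-subsets of arr[i:] summing to target, lexicographic
def goodB (arr : List Int) (i need : Nat) (target : Int) : List (List Nat) :=
  if _hneed : need = 0 then (if target = 0 then [[]] else [])
  else if _hrange : (arr.length : Int) - (i : Int) < (need : Int) then []
  else
    ((goodB arr (i + 1) (need - 1) (target - PySem.List.pyGetD arr (i : Int) 0)).map
        (fun rest => i :: rest))
      ++ goodB arr (i + 1) need target
termination_by arr.length - i
decreasing_by all_goals omega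

def findWithSum_alt (arr : List Int) (value : Int) (n : Int) : List (Int × Int) :=
  if n = 0 ∨ arr.length = 0 then [] else
  let res : PySem.Dict Int Int :=
    (goodB arr 0 n.toNat value).foldl (fun res combo =>
      combo.foldl (fun r i => r.insert (i : Int) (PySem.List.pyGetD arr (i : Int) 0)) res)
      PySem.Dict.empty
  res.items

-- ===== PRECONDITION & SPEC =====
-- Pre_ excludes n < 0, where A raises ValueError (itertools.combinations) and B's recursion raises RecursionError.
def Pre_findWithSum (arr : List Int) (value : Int) (n : Int) : Prop := 0 ≤ n
instance (arr : List Int) (value : Int) (n : Int) : Decidable (Pre_findWithSum arr value n) := by unfold Pre_findWithSum; infer_instance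
def pvWitness_findWithSum : List Int × Int × Int := ([1, 2, 3], 3, 2)

def Spec_findWithSum (arr : List Int) (value : Int) (n : Int) (out : List (Int × Int)) : Prop := out = findWithSum_alt arr value n
instance (arr : List Int) (value : Int) (n : Int) (out : List (Int × Int)) : Decidable (Spec_findWithSum arr value n out) := by unfold Spec_findWithSum; infer_instance

-- ===== CLAIM (what is proved, stated in full; the proofs are below) =====
def Claim_equal_findWithSum : Prop := ∀ (arr : List Int) (value : Int) (n : Int), Dom_findWithSum arr value n → Pre_findWithSum arr value n → Spec_findWithSum arr value n (findWithSum arr value n)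

-- ===== LEMMAS AND PROOFS =====

lemma combsA_nil_of_short {α : Type} (need : Nat) (l : List α) (h : l.length < need) :
    combsA need l = [] := by
  induction l generalizing need with
  | nil => cases need with
    | zero => omega
    | succ k => rfl
  | cons x xs ih =>
    cases need with
    | zero => omega
    | succ k =>
      simp only [combsA, List.length_cons] at *
      rw [ih k (by omega), ih (k + 1) (by omega)]
      simp

-- the central correspondence: A's filtered combinations of the enumerated suffix
-- are exactly B's good index sets, decorated with their (index, value) pairs
lemma goodB_spec (arr : List Int) (d : Nat) :
    ∀ (i need : Nat) (target : Int), arr.length - i ≤ d → i ≤ arr.length →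
      ((combsA need ((PySem.List.enumerate arr 0).drop i)).filter
          (fun sub => decide (sub.foldl (fun v t => v + t.2) 0 = target)))
        = (goodB arr i need target).map
            (fun is => is.map (fun j => ((j : Int), PySem.List.pyGetD arr (j : Int) 0))) := by
  induction d with
  | zero =>
    intro i need target hd hi
    cases need with
    | zero =>
      by_cases ht : target = 0
      · simp [combsA, goodB, ht]
      · simp [combsA, goodB, ht]; omega
    | succ k =>
      have hlt : (arr.length : Int) - (i : Nat) < ((k + 1 : Nat) : Int) := by omega
      rw [combsA_nil_of_short _ _ (by rw [List.length_drop, PySem.List.length_enumerate]; omega)]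
      rw [goodB, dif_neg (Nat.succ_ne_zero k), dif_pos hlt]
      simp
  | succ d ih =>
    intro i need target hd hi
    cases need with
    | zero =>
      by_cases ht : target = 0
      · simp [combsA, goodB, ht]
      · simp [combsA, goodB, ht]; omega
    | succ k =>
      by_cases hlt : (arr.length : Int) - (i : Nat) < ((k + 1 : Nat) : Int)
      · rw [combsA_nil_of_short _ _ (by rw [List.length_drop, PySem.List.length_enumerate]; omega)]
        rw [goodB, dif_neg (Nat.succ_ne_zero k), dif_pos hlt]
        simp
      · have hil : i < arr.length := by omega
        have hidx : i < (PySem.List.enumerate arr 0).length := by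
          rw [PySem.List.length_enumerate]; omega
        have hget : PySem.List.pyGetD arr (i : Int) 0 = arr[i] := by
          rw [PySem.List.pyGetD_natCast, List.getD_eq_getElem arr 0 hil]
        rw [List.drop_eq_getElem_cons hidx, PySem.List.getElem_enumerate]
        rw [combsA, List.filter_append, List.filter_map]
        have hp : ∀ sub ∈ combsA k ((PySem.List.enumerate arr 0).drop (i + 1)),
            ((fun sub => decide (sub.foldl (fun v t => v + t.2) 0 = target)) ∘
              ((0 + (i : Int), arr[i]) :: ·)) sub
            = (fun sub => decide (sub.foldl (fun v t => v + t.2) 0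
                = target - PySem.List.pyGetD arr (i : Int) 0)) sub := by
          intro sub _
          simp only [Function.comp_apply, PySem.List.foldl_add, List.map_cons,
            List.sum_cons, hget, decide_eq_decide]
          omega
        rw [List.filter_congr hp]
        rw [ih (i + 1) k (target - PySem.List.pyGetD arr (i : Int) 0) (by omega) (by omega),
            ih (i + 1) (k + 1) target (by omega) (by omega)]
        conv_rhs => rw [goodB, dif_neg (Nat.succ_ne_zero k), dif_neg hlt]
        simp only [Nat.add_sub_cancel, List.map_append, List.map_map]
        congr 1
        apply List.map_congr_left
        intro is _
        simp [Function.comp, hget]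

theorem findWithSum_spec : Claim_equal_findWithSum := by
  intro arr value n _dom hpre
  show findWithSum arr value n = findWithSum_alt arr value n
  unfold findWithSum findWithSum_alt
  by_cases h : n = 0 ∨ arr.length = 0
  · rw [if_pos h, if_pos h]
  · rw [if_neg h, if_neg h]
    rw [PySem.List.foldl_append_singleton_eq_map]
    simp only [List.nil_append, Prod.mk.eta, List.map_id']
    congr 1
    rw [PySem.List.foldl_ite_eq_foldl_filter
      (fun (sub : List (Int × Int)) => List.foldl (fun v t => v + t.2) 0 sub = value)
      (fun (res : PySem.Dict Int Int) (sub : List (Int × Int)) =>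
        List.foldl (fun r t => r.insert t.1 t.2) res sub)]
    have hmain := goodB_spec arr arr.length 0 n.toNat value (by omega) (by omega)
    rw [List.drop_zero] at hmain
    rw [hmain, List.foldl_map]
    congr 1
    funext res is
    rw [List.foldl_map]
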